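-- pv_equiv track=rewrite | github.com/Practice-Coding-Test/Individual-Code | kyk/13week/13week_kyk2.py | solution
-- ===== SOURCE A (Python) =====
-- def solution(answers):
--     student1= [1,2,3,4,5]
--     student2= [2,1,2,3,2,4,2,5]
--     student3= [3,3,1,1,2,2,4,4,5,5]
--     q, score, result= 0, {1:0, 2:0, 3:0}, []
--
--     for answer in answers:
--         q += 1
--         if student1[q%5-1] == answer:
--             score[1] += 1
--         if student2[q%8-1] == answer:
--             score[2] += 1
--         if student3[q%10-1] == answer:
--             score[3] += 1
--
--     high= max(list(score.values()))
--     for i in range (1,4):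
--         if high == score[i]:
--             result.append(i)
--
--     return result
-- ===== SOURCE B (Python) =====
-- def solution(answers):
--     # Frequency-table approach: all three patterns repeat with period dividing
--     # 40 (= lcm(5, 8, 10)), so one pass tallies freq[(i % 40, answer)] and each
--     # student's score is read off the table in O(40), never rescanning answers.
--     freq = {}
--     for i, a in enumerate(answers):
--         key = (i % 40, a)
--         freq[key] = freq.get(key, 0) + 1
--     patterns = [[1, 2, 3, 4, 5], [2, 1, 2, 3, 2, 4, 2, 5], [3, 3, 1, 1, 2, 2, 4, 4, 5, 5]]
--     scores = [sum(freq.get((r, p[r % len(p)]), 0) for r in range(40)) for p in patterns]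
--     high = max(scores)
--     return [s for s in (1, 2, 3) if scores[s - 1] == high]
-- ===== Notes on version B (the rewrite author's own statement) =====
-- stated objective: alternative
-- what changed: Instead of comparing each answer against all three patterns in one interleaved loop, B builds a frequency table keyed by (index mod 40, answer) in a single pass (40 = lcm of the three pattern lengths) and then reads each student's score off the table with 40 dictionary lookups; max and a comprehension pick the top scorers.
import Mathlib
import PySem

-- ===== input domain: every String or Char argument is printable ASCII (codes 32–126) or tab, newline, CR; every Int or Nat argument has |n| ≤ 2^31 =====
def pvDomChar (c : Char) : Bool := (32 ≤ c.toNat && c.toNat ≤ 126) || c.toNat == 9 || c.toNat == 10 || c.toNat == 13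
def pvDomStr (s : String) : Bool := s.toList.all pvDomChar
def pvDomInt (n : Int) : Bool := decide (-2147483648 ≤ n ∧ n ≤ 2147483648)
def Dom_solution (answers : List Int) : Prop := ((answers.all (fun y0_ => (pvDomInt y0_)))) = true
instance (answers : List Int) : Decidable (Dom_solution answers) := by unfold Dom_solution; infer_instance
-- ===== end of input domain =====

-- B replaces A's per-answer triple comparison with a frequency table keyed by
-- (index mod 40, answer) built in one pass; each student's score is then read
-- off the table in 40 lookups (alternative decomposition, same O(n) cost).


-- ===== PORT A =====
-- one iteration of A's `for answer in answers` loop: state = (q, score dict)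
def solutionStep (st : Int × PySem.Dict Int Int) (answer : Int) : Int × PySem.Dict Int Int :=
  let student1 : List Int := [1,2,3,4,5]
  let student2 : List Int := [2,1,2,3,2,4,2,5]
  let student3 : List Int := [3,3,1,1,2,2,4,4,5,5]
  let q := st.1 + 1
  let score := st.2
  let score := if PySem.List.pyGet? student1 (PySem.Int.mod q 5 - 1) = some answer then
      score.modify 1 0 (· + 1) else score
  let score := if PySem.List.pyGet? student2 (PySem.Int.mod q 8 - 1) = some answer then
      score.modify 2 0 (· + 1) else score
  let score := if PySem.List.pyGet? student3 (PySem.Int.mod q 10 - 1) = some answer then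
      score.modify 3 0 (· + 1) else score
  (q, score)

def solution (answers : List Int) : List Int :=
  let st := answers.foldl solutionStep (0, PySem.Dict.mk [(1,0),(2,0),(3,0)])
  let score := st.2
  -- the dict always has the three entries, so max() never sees an empty list
  let high := (PySem.List.max? score.values id).getD 0
  (PySem.List.pyRange 1 4 1).foldl
    (fun result i => if high = score.getD i 0 then result ++ [i] else result) []

-- ===== PORT B =====
-- freq[(i % 40, a)] = freq.get(key, 0) + 1, one pass over enumerate(answers)
def solution_alt (answers : List Int) : List Int :=
  let freq := (PySem.List.enumerate answers).foldl
    (fun d ia =>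
      let key : Int × Int := (PySem.Int.mod ia.1 40, ia.2)
      d.insert key (d.getD key 0 + 1))
    (PySem.Dict.empty : PySem.Dict (Int × Int) Int)
  let patterns : List (List Int) := [[1,2,3,4,5],[2,1,2,3,2,4,2,5],[3,3,1,1,2,2,4,4,5,5]]
  -- sum(freq.get((r, p[r % len(p)]), 0) for r in range(40))
  let scores := patterns.map (fun p =>
    ((PySem.List.pyRange 0 40 1).map
      (fun r => freq.getD (r, PySem.List.pyGetD p (PySem.Int.mod r (p.length : Int)) 0) 0)).sum)
  let high := (PySem.List.max? scores id).getD 0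
  ([1,2,3] : List Int).filter (fun s => PySem.List.pyGetD scores (s - 1) 0 = high)

-- ===== PRECONDITION & SPEC =====
def Spec_solution (answers : List Int) (out : List Int) : Prop := out = solution_alt answers
instance (answers : List Int) (out : List Int) : Decidable (Spec_solution answers out) := by unfold Spec_solution; infer_instance

-- ===== CLAIM (what is proved, stated in full; the proofs are below) =====
def Claim_equal_solution : Prop := ∀ (answers : List Int), Dom_solution answers → Spec_solution answers (solution answers)

-- ===== LEMMAS AND PROOFS =====

-- A-side characterisation: number of matches of pattern p against answers
-- enumerated from index i
def cnt (p : List Int) (i : Nat) (answers : List Int) : Int :=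
  ((PySem.List.enumerate answers (i:Int)).map
    (fun ia => if ia.2 = PySem.List.pyGetD p (PySem.Int.mod ia.1 (p.length : Int)) 0
               then (1:Int) else 0)).sum

lemma idx_align (pat : List Int) (N : Nat) (h0 : 1 < N)
    (hall : ∀ r : Nat, r < N →
      PySem.List.pyGet? pat ((((r+1) % N : Nat) : Int) - 1)
        = some (PySem.List.pyGetD pat ((r : Nat) : Int) 0)) (i : Nat) :
    PySem.List.pyGet? pat (PySem.Int.mod ((i:Int)+1) (N:Int) - 1)
      = some (PySem.List.pyGetD pat (PySem.Int.mod (i:Int) (N:Int)) 0) := by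
  have h1 : PySem.Int.mod ((i:Int)+1) (N:Int) = (((i+1) % N : Nat) : Int) := by
    exact_mod_cast PySem.Int.mod_natCast (i+1) N
  have h2 : PySem.Int.mod ((i:Int)) (N:Int) = ((i % N : Nat) : Int) := by
    exact_mod_cast PySem.Int.mod_natCast i N
  rw [h1, h2, Nat.add_mod, Nat.mod_eq_of_lt h0]
  exact hall (i % N) (Nat.mod_lt _ (by omega))

lemma cnt_cons (p : List Int) (i : Nat) (x : Int) (xs : List Int) :
    cnt p i (x :: xs)
      = (if x = PySem.List.pyGetD p (PySem.Int.mod (i:Int) (p.length : Int)) 0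
         then (1:Int) else 0) + cnt p (i+1) xs := by
  simp [cnt, PySem.List.enumerate_cons]

def pat1 : List Int := [1,2,3,4,5]
def pat2 : List Int := [2,1,2,3,2,4,2,5]
def pat3 : List Int := [3,3,1,1,2,2,4,4,5,5]

def vOf (p : List Int) (i : Nat) : Int :=
  PySem.List.pyGetD p (PySem.Int.mod (i:Int) (p.length : Int)) 0

lemma idx1 (i : Nat) : PySem.List.pyGet? pat1 (PySem.Int.mod ((i:Int)+1) 5 - 1)
    = some (vOf pat1 i) := by
  simpa [vOf, pat1] using idx_align pat1 5 (by omega) (by decide) i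

lemma idx2 (i : Nat) : PySem.List.pyGet? pat2 (PySem.Int.mod ((i:Int)+1) 8 - 1)
    = some (vOf pat2 i) := by
  simpa [vOf, pat2] using idx_align pat2 8 (by omega) (by decide) i

lemma idx3 (i : Nat) : PySem.List.pyGet? pat3 (PySem.Int.mod ((i:Int)+1) 10 - 1)
    = some (vOf pat3 i) := by
  simpa [vOf, pat3] using idx_align pat3 10 (by omega) (by decide) i

lemma ite_eq_swap {alpha : Type} (x y : Int) (t e : alpha) :
    (if x = y then t else e) = (if y = x then t else e) := by
  by_cases h : x = y
  · simp [h]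
  · rw [if_neg h, if_neg (fun hh => h hh.symm)]

lemma step_eq (i : Nat) (a b c x : Int) :
    solutionStep ((i:Int), PySem.Dict.mk [(1,a),(2,b),(3,c)]) x
    = ((i:Int) + 1, PySem.Dict.mk
        [(1, a + if x = vOf pat1 i then 1 else 0),
         (2, b + if x = vOf pat2 i then 1 else 0),
         (3, c + if x = vOf pat3 i then 1 else 0)]) := by
  have e1 := idx1 i; have e2 := idx2 i; have e3 := idx3 i
  simp only [pat1, pat2, pat3] at e1 e2 e3
  simp only [solutionStep, e1, e2, e3, Option.some.injEq, pat1, pat2, pat3]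
  rw [ite_eq_swap (vOf [1,2,3,4,5] i) x, ite_eq_swap (vOf [2,1,2,3,2,4,2,5] i) x,
      ite_eq_swap (vOf [3,3,1,1,2,2,4,4,5,5] i) x]
  split_ifs <;>
    simp [PySem.Dict.modify, PySem.Dict.insert, PySem.Dict.getD,
      PySem.Dict.get?, PySem.Dict.contains]

lemma cnt_cons' (p : List Int) (i : Nat) (x : Int) (xs : List Int) :
    cnt p i (x :: xs) = (if x = vOf p i then (1:Int) else 0) + cnt p (i+1) xs :=
  cnt_cons p i x xs

lemma loop_inv (answers : List Int) : ∀ (i : Nat) (a b c : Int),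
    answers.foldl solutionStep ((i:Int), PySem.Dict.mk [(1,a),(2,b),(3,c)])
    = ((i:Int) + answers.length,
       PySem.Dict.mk [(1, a + cnt pat1 i answers),
                      (2, b + cnt pat2 i answers),
                      (3, c + cnt pat3 i answers)]) := by
  induction answers with
  | nil => intro i a b c; simp [cnt]
  | cons x xs ih =>
    intro i a b c
    rw [List.foldl_cons, step_eq i a b c x]
    have hcast : ((i:Int) + 1) = (((i+1 : Nat)) : Int) := by push_cast; ring
    rw [hcast, ih (i+1)]
    rw [cnt_cons' pat1 i x xs, cnt_cons' pat2 i x xs, cnt_cons' pat3 i x xs]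
    simp only [List.length_cons]
    push_cast
    ring_nf

-- B-side: the frequency fold IS a counter over the key list
def keyfn (ia : Int × Int) : Int × Int := (PySem.Int.mod ia.1 40, ia.2)

lemma freq_eq_counter (answers : List Int) :
    (PySem.List.enumerate answers).foldl
      (fun d ia => d.insert (PySem.Int.mod ia.1 40, ia.2)
        (d.getD (PySem.Int.mod ia.1 40, ia.2) 0 + 1))
      (PySem.Dict.empty : PySem.Dict (Int × Int) Int)
    = PySem.Dict.counter ((PySem.List.enumerate answers).map keyfn) := by
  rw [← PySem.Dict.foldl_insert_getD_add_one_eq_counter, List.foldl_map]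
  rfl

-- a one-hot sum over a nodup list containing m
lemma sum_zero_of_not_mem (rs : List Int) (m x : Int) (pvf : Int → Int)
    (hm : m ∉ rs) :
    (rs.map (fun r => if (r, pvf r) = (m, x) then (1:Int) else 0)).sum = 0 := by
  apply List.sum_eq_zero
  intro y hy
  rcases List.mem_map.1 hy with ⟨r, hr, hry⟩
  have : (r, pvf r) ≠ (m, x) := by
    intro h; exact hm (by cases h; exact hr)
  simpa [this] using hry.symm

lemma one_hot (rs : List Int) (m x : Int) (pvf : Int → Int)
    (hnd : rs.Nodup) (hm : m ∈ rs) :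
    (rs.map (fun r => if (r, pvf r) = (m, x) then (1:Int) else 0)).sum
    = if pvf m = x then 1 else 0 := by
  induction rs with
  | nil => cases hm
  | cons a rs ih =>
    rcases List.nodup_cons.1 hnd with ⟨ha, hnd'⟩
    rcases List.mem_cons.1 hm with h | h
    · subst h
      rw [List.map_cons, List.sum_cons, sum_zero_of_not_mem rs m x pvf ha]
      by_cases hx : pvf m = x
      · simp [hx]
      · have : (m, pvf m) ≠ (m, x) := by simp [hx]
        simp [this, hx]
    · have ham : (a, pvf a) ≠ (m, x) := by
        intro he; cases he; exact ha h
      rw [List.map_cons, List.sum_cons, if_neg ham, ih hnd' h, zero_add]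

-- the value B looks up at residue r = i % 40 is A's pattern value at index i
lemma pv_collapse (p : List Int) (hlen : 0 < p.length) (hdvd : (p.length : Int) ∣ 40)
    (i : Nat) :
    PySem.List.pyGetD p (PySem.Int.mod (PySem.Int.mod (i:Int) 40) (p.length : Int)) 0
      = vOf p i := by
  unfold vOf
  congr 1
  have hp : (0:Int) < (p.length : Int) := by exact_mod_cast hlen
  rw [PySem.Int.mod_eq_emod_of_pos (show (0:Int) < 40 by norm_num),
      PySem.Int.mod_eq_emod_of_pos hp, PySem.Int.mod_eq_emod_of_pos hp]
  exact Int.emod_emod_of_dvd _ hdvd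

-- core bridge: B's 40 table lookups for pattern p add up to A's match count
lemma score_eq_cnt (p : List Int) (hlen : 0 < p.length) (hdvd : (p.length : Int) ∣ 40) :
    ∀ (answers : List Int) (i : Nat),
    ((PySem.List.pyRange 0 40 1).map
      (fun r => ((((PySem.List.enumerate answers (i:Int)).map keyfn).count
          (r, PySem.List.pyGetD p (PySem.Int.mod r (p.length : Int)) 0) : Nat) : Int))).sum
    = cnt p i answers := by
  intro answers
  induction answers with
  | nil =>
    intro i
    simp [cnt, PySem.List.enumerate_nil]
  | cons x xs ih =>
    intro i
    rw [PySem.List.enumerate_cons, List.map_cons]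
    have hsplit : ∀ r : Int,
        ((((keyfn ((i:Int), x) :: (PySem.List.enumerate xs ((i:Int)+1)).map keyfn).count
            (r, PySem.List.pyGetD p (PySem.Int.mod r (p.length : Int)) 0) : Nat) : Int))
        = (((PySem.List.enumerate xs ((i:Int)+1)).map keyfn).count
            (r, PySem.List.pyGetD p (PySem.Int.mod r (p.length : Int)) 0) : Int)
          + (if (r, PySem.List.pyGetD p (PySem.Int.mod r (p.length : Int)) 0)
                = keyfn ((i:Int), x) then (1:Int) else 0) := by
      intro r
      rw [List.count_cons]
      push_cast
      by_cases h : (r, PySem.List.pyGetD p (PySem.Int.mod r (p.length : Int)) 0)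
          = keyfn ((i:Int), x)
      · simp [h]
      · have h' : keyfn ((i:Int), x) ≠ (r, PySem.List.pyGetD p (PySem.Int.mod r (p.length : Int)) 0) :=
          fun he => h he.symm
        simp [h, h']
    simp only [hsplit]
    rw [PySem.List.sum_map_add_int]
    have hcast : ((i:Int) + 1) = (((i+1 : Nat)) : Int) := by push_cast; ring
    rw [hcast, ih (i+1)]
    have hm : PySem.Int.mod (i:Int) 40 ∈ PySem.List.pyRange 0 40 1 := by
      rw [PySem.List.mem_pyRange_one]
      exact ⟨PySem.Int.mod_nonneg _ (by norm_num), PySem.Int.mod_lt _ (by norm_num)⟩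
    have hhot := one_hot (PySem.List.pyRange 0 40 1) (PySem.Int.mod (i:Int) 40) x
      (fun r => PySem.List.pyGetD p (PySem.Int.mod r (p.length : Int)) 0)
      (PySem.List.nodup_pyRange_one 0 40) hm
    have hval : (if PySem.List.pyGetD p
          (PySem.Int.mod (PySem.Int.mod (i:Int) 40) (p.length : Int)) 0 = x
        then (1:Int) else 0) = (if x = vOf p i then (1:Int) else 0) := by
      rw [pv_collapse p hlen hdvd i, ite_eq_swap (vOf p i) x]
    -- defeq cast: hhot's statement differs from the goal only in instance paths
    have hS : ((PySem.List.pyRange 0 40 1).map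
        (fun r => if (r, PySem.List.pyGetD p (PySem.Int.mod r (p.length : Int)) 0)
            = keyfn ((i:Int), x) then (1:Int) else 0)).sum
        = (if x = vOf p i then (1:Int) else 0) := hhot.trans hval
    rw [cnt_cons' p i x xs]
    exact (add_comm _ _).trans (congrArg (fun z => z + cnt p (i+1) xs) hS)

lemma final_select (A B C high : Int) :
    List.foldl (fun result i =>
        if high = (PySem.Dict.mk [((1:Int),A),(2,B),(3,C)]).getD i 0
        then result ++ [i] else result) [] ([1,2,3] : List Int)
    = List.filter (fun s => decide (PySem.List.pyGetD [A,B,C] (s - 1) 0 = high))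
        ([1,2,3] : List Int) := by
  have g1 : (PySem.Dict.mk [((1:Int),A),(2,B),(3,C)]).getD 1 0 = A := by
    simp [PySem.Dict.getD, PySem.Dict.get?]
  have g2 : (PySem.Dict.mk [((1:Int),A),(2,B),(3,C)]).getD 2 0 = B := by
    simp [PySem.Dict.getD, PySem.Dict.get?]
  have g3 : (PySem.Dict.mk [((1:Int),A),(2,B),(3,C)]).getD 3 0 = C := by
    simp [PySem.Dict.getD, PySem.Dict.get?]
  have p1 : PySem.List.pyGetD [A,B,C] ((1:Int) - 1) 0 = A := by
    norm_num [PySem.List.pyGetD, PySem.List.pyGet?, PySem.List.pyIdx?]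
  have p2 : PySem.List.pyGetD [A,B,C] ((2:Int) - 1) 0 = B := by
    norm_num [PySem.List.pyGetD, PySem.List.pyGet?, PySem.List.pyIdx?]
  have p3 : PySem.List.pyGetD [A,B,C] ((3:Int) - 1) 0 = C := by
    norm_num [PySem.List.pyGetD, PySem.List.pyGet?, PySem.List.pyIdx?]
    rfl
  simp only [List.foldl_cons, List.foldl_nil, List.filter_cons, List.filter_nil,
    g1, g2, g3, p1, p2, p3, decide_eq_true_eq]
  split_ifs <;> first
    | rfl
    | (exfalso; omega)

-- ===== VERDICT (by name: the statement is the Claim_ definition above) =====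
theorem solution_spec : Claim_equal_solution := by
  intro answers _
  unfold Spec_solution
  have h : answers.foldl solutionStep (0, PySem.Dict.mk [(1,0),(2,0),(3,0)])
      = ((answers.length : Int), PySem.Dict.mk
          [(1, cnt [1,2,3,4,5] 0 answers),
           (2, cnt [2,1,2,3,2,4,2,5] 0 answers),
           (3, cnt [3,3,1,1,2,2,4,4,5,5] 0 answers)]) := by
    simpa [pat1, pat2, pat3] using loop_inv answers 0 0 0 0
  have s1 : ((PySem.List.pyRange 0 40 1).map
      (fun r => ((((PySem.List.enumerate answers).map keyfn).count
          (r, PySem.List.pyGetD [1,2,3,4,5]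
            (PySem.Int.mod r (([1,2,3,4,5] : List Int).length : Int)) 0) : Nat) : Int))).sum
      = cnt [1,2,3,4,5] 0 answers :=
    score_eq_cnt [1,2,3,4,5] (by decide) (by decide) answers 0
  have s2 : ((PySem.List.pyRange 0 40 1).map
      (fun r => ((((PySem.List.enumerate answers).map keyfn).count
          (r, PySem.List.pyGetD [2,1,2,3,2,4,2,5]
            (PySem.Int.mod r (([2,1,2,3,2,4,2,5] : List Int).length : Int)) 0) : Nat) : Int))).sum
      = cnt [2,1,2,3,2,4,2,5] 0 answers :=
    score_eq_cnt [2,1,2,3,2,4,2,5] (by decide) (by decide) answers 0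
  have s3 : ((PySem.List.pyRange 0 40 1).map
      (fun r => ((((PySem.List.enumerate answers).map keyfn).count
          (r, PySem.List.pyGetD [3,3,1,1,2,2,4,4,5,5]
            (PySem.Int.mod r (([3,3,1,1,2,2,4,4,5,5] : List Int).length : Int)) 0) : Nat) : Int))).sum
      = cnt [3,3,1,1,2,2,4,4,5,5] 0 answers :=
    score_eq_cnt [3,3,1,1,2,2,4,4,5,5] (by decide) (by decide) answers 0
  have hA : solution answers = (PySem.List.pyRange 1 4 1).foldl
      (fun result i =>
        if (PySem.List.max?
              (answers.foldl solutionStep (0, PySem.Dict.mk [(1,0),(2,0),(3,0)])).2.values id).getD 0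
            = (answers.foldl solutionStep (0, PySem.Dict.mk [(1,0),(2,0),(3,0)])).2.getD i 0
        then result ++ [i] else result) [] := rfl
  have hB : solution_alt answers = ([1,2,3] : List Int).filter
      (fun s => PySem.List.pyGetD
          [((PySem.List.pyRange 0 40 1).map
              (fun r => ((PySem.List.enumerate answers).foldl
                  (fun d ia => d.insert (PySem.Int.mod ia.1 40, ia.2)
                    (d.getD (PySem.Int.mod ia.1 40, ia.2) 0 + 1)) (PySem.Dict.empty : PySem.Dict (Int × Int) Int)).getD
                (r, PySem.List.pyGetD [1,2,3,4,5]
                  (PySem.Int.mod r (([1,2,3,4,5] : List Int).length : Int)) 0) 0)).sum,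
           ((PySem.List.pyRange 0 40 1).map
              (fun r => ((PySem.List.enumerate answers).foldl
                  (fun d ia => d.insert (PySem.Int.mod ia.1 40, ia.2)
                    (d.getD (PySem.Int.mod ia.1 40, ia.2) 0 + 1)) (PySem.Dict.empty : PySem.Dict (Int × Int) Int)).getD
                (r, PySem.List.pyGetD [2,1,2,3,2,4,2,5]
                  (PySem.Int.mod r (([2,1,2,3,2,4,2,5] : List Int).length : Int)) 0) 0)).sum,
           ((PySem.List.pyRange 0 40 1).map
              (fun r => ((PySem.List.enumerate answers).foldl
                  (fun d ia => d.insert (PySem.Int.mod ia.1 40, ia.2)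
                    (d.getD (PySem.Int.mod ia.1 40, ia.2) 0 + 1)) (PySem.Dict.empty : PySem.Dict (Int × Int) Int)).getD
                (r, PySem.List.pyGetD [3,3,1,1,2,2,4,4,5,5]
                  (PySem.Int.mod r (([3,3,1,1,2,2,4,4,5,5] : List Int).length : Int)) 0) 0)).sum]
          (s - 1) 0
        = (PySem.List.max?
            [((PySem.List.pyRange 0 40 1).map
                (fun r => ((PySem.List.enumerate answers).foldl
                    (fun d ia => d.insert (PySem.Int.mod ia.1 40, ia.2)
                      (d.getD (PySem.Int.mod ia.1 40, ia.2) 0 + 1)) (PySem.Dict.empty : PySem.Dict (Int × Int) Int)).getD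
                  (r, PySem.List.pyGetD [1,2,3,4,5]
                    (PySem.Int.mod r (([1,2,3,4,5] : List Int).length : Int)) 0) 0)).sum,
             ((PySem.List.pyRange 0 40 1).map
                (fun r => ((PySem.List.enumerate answers).foldl
                    (fun d ia => d.insert (PySem.Int.mod ia.1 40, ia.2)
                      (d.getD (PySem.Int.mod ia.1 40, ia.2) 0 + 1)) (PySem.Dict.empty : PySem.Dict (Int × Int) Int)).getD
                  (r, PySem.List.pyGetD [2,1,2,3,2,4,2,5]
                    (PySem.Int.mod r (([2,1,2,3,2,4,2,5] : List Int).length : Int)) 0) 0)).sum,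
             ((PySem.List.pyRange 0 40 1).map
                (fun r => ((PySem.List.enumerate answers).foldl
                    (fun d ia => d.insert (PySem.Int.mod ia.1 40, ia.2)
                      (d.getD (PySem.Int.mod ia.1 40, ia.2) 0 + 1)) (PySem.Dict.empty : PySem.Dict (Int × Int) Int)).getD
                  (r, PySem.List.pyGetD [3,3,1,1,2,2,4,4,5,5]
                    (PySem.Int.mod r (([3,3,1,1,2,2,4,4,5,5] : List Int).length : Int)) 0) 0)).sum]
            id).getD 0) := rfl
  rw [hA, hB, h, freq_eq_counter]
  simp only [PySem.Dict.getD_counter]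
  rw [s1, s2, s3]
  have hr : PySem.List.pyRange 1 4 1 = [1,2,3] := by rw [PySem.List.pyRange_one]; decide
  rw [hr]
  simp only [PySem.Dict.values_mk, List.map_cons, List.map_nil]
  generalize cnt [1,2,3,4,5] 0 answers = A
  generalize cnt [2,1,2,3,2,4,2,5] 0 answers = B
  generalize cnt [3,3,1,1,2,2,4,4,5,5] 0 answers = C
  exact final_select A B C _
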